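-- pv_equiv track=rewrite | github.com/Rwilmes/SML | ex3/Code/31c.py | get_plot_points
-- ===== SOURCE A (Python) =====
-- def get_plot_points(x, y):
-- 	points = {}
-- 	for i in range(0, len(x)):
-- 		points[x[i]]=y[i]
-- 	x_sorted = []
-- 	y_sorted = []
-- 	for x in sorted(points.keys()):
-- 		x_sorted.append(x)
-- 		y_sorted.append(points[x])
-- 	return x_sorted, y_sorted
-- ===== SOURCE B (Python) =====
-- def get_plot_points(x, y):
--     pairs = [(x[i], y[i]) for i in range(len(x))]
--     seen = set()
--     kept = []
--     for k, v in reversed(pairs):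
--         if k not in seen:
--             seen.add(k)
--             kept.append((k, v))
--     kept.sort(key=lambda p: p[0])
--     return [k for k, _ in kept], [v for _, v in kept]
-- ===== Notes on version B (the rewrite author's own statement) =====
-- stated objective: alternative
-- what changed: Replaces A's hash-dict overwrite dedup plus sorted-keys lookup loop by a dict-free pipeline: build the (x,y) pair list, scan it in reverse keeping the first occurrence of each x with a seen-set (= the last pair overall), sort the kept pairs by x once, and unzip.
import Mathlib
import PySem

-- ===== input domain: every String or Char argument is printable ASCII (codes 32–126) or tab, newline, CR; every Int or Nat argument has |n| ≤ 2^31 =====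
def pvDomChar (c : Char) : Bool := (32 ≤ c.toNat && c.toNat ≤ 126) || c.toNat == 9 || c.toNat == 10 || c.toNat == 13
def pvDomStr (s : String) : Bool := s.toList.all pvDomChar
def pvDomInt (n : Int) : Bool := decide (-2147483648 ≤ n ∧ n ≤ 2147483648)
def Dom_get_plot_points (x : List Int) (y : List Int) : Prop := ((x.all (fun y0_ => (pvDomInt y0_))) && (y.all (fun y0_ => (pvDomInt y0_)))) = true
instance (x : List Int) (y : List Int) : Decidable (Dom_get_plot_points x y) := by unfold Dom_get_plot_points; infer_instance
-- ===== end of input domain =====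

-- B replaces A's dict-overwrite dedup by a reverse scan with a seen-set keeping the last
-- (x, y) pair per x value, then one sort of the kept pairs (objective: alternative).

-- ===== PORT A =====
-- A: fill a dict points[x[i]] = y[i] (last write wins), then walk sorted(points.keys()).
-- points[x] in the second loop cannot raise (every iterated key is a key of points), so getD is exact there.
def get_plot_points (x : List Int) (y : List Int) : List Int × List Int :=
  let points : PySem.Dict Int Int :=
    (PySem.List.pyRange 0 (x.length : Int) 1).foldl
      (fun d i => d.insert (PySem.List.pyGetD x i 0) (PySem.List.pyGetD y i 0))
      PySem.Dict.empty
  (PySem.List.sorted (PySem.Dict.keys points) (fun k => k) false).foldl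
    (fun (acc : List Int × List Int) k => (acc.1 ++ [k], acc.2 ++ [PySem.Dict.getD points k 0]))
    ([], [])

-- ===== PORT B =====
-- B: pairs (x[i], y[i]); reverse scan keeping the first occurrence of each key (= last overall)
-- with a seen-set; sort the kept pairs by key; unzip.
def get_plot_points_alt (x : List Int) (y : List Int) : List Int × List Int :=
  let pairs : List (Int × Int) :=
    (PySem.List.pyRange 0 (x.length : Int) 1).map
      (fun i => (PySem.List.pyGetD x i 0, PySem.List.pyGetD y i 0))
  let sk : PySem.Set Int × List (Int × Int) :=
    pairs.reverse.foldl
      (fun acc p =>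
        if PySem.Set.contains acc.1 p.1 then acc
        else (PySem.Set.add acc.1 p.1, acc.2 ++ [p]))
      (PySem.Set.empty, [])
  let kept := PySem.List.sorted sk.2 (fun p => p.1) false
  (kept.map (fun p => p.1), kept.map (fun p => p.2))

-- ===== PRECONDITION & SPEC =====
-- A raises IndexError at y[i] when len(y) < len(x); exactly those inputs are excluded.
def Pre_get_plot_points (x : List Int) (y : List Int) : Prop := x.length ≤ y.length
instance (x : List Int) (y : List Int) : Decidable (Pre_get_plot_points x y) := by unfold Pre_get_plot_points; infer_instance
def pvWitness_get_plot_points : List Int × List Int := ([3, 1, 3, 2], [10, 20, 30, 40])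
def Spec_get_plot_points (x : List Int) (y : List Int) (out : List Int × List Int) : Prop := out = get_plot_points_alt x y
instance (x : List Int) (y : List Int) (out : List Int × List Int) : Decidable (Spec_get_plot_points x y out) := by unfold Spec_get_plot_points; infer_instance

-- ===== CLAIM (what is proved, stated in full; the proofs are below) =====
def Claim_equal_get_plot_points : Prop := ∀ (x : List Int) (y : List Int), Dom_get_plot_points x y → Pre_get_plot_points x y → Spec_get_plot_points x y (get_plot_points x y)

-- ===== LEMMAS AND PROOFS =====

-- the per-index pair list both ports range over
def pvL (x y : List Int) : List (Int × Int) :=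
  (List.range x.length).map (fun k => (x.getD k 0, y.getD k 0))

-- last y-value written for key k (the 0 default is never read for k among the keys)
def pvLastVal (L : List (Int × Int)) (k : Int) : Int :=
  (((L.filter (fun p => p.1 == k)).map Prod.snd).getLast?).getD 0

-- B's reverse-scan dedup, as a structural recursion
def pvGo : List (Int × Int) → PySem.Set Int → List (Int × Int)
  | [], _ => []
  | p :: t, s =>
      if PySem.Set.contains s p.1 then pvGo t s else p :: pvGo t (PySem.Set.add s p.1)

lemma pv_pairs_eq (x y : List Int) :
    (PySem.List.pyRange 0 (x.length : Int) 1).map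
      (fun i => (PySem.List.pyGetD x i 0, PySem.List.pyGetD y i 0)) = pvL x y := by
  rw [PySem.List.pyRange_one]
  simp [pvL, List.map_map, Function.comp]

lemma pv_dict_eq (x y : List Int) :
    (PySem.List.pyRange 0 (x.length : Int) 1).foldl
      (fun d i => d.insert (PySem.List.pyGetD x i 0) (PySem.List.pyGetD y i 0))
      PySem.Dict.empty
    = (pvL x y).foldl (fun d p => d.insert p.1 p.2) PySem.Dict.empty := by
  rw [PySem.List.pyRange_one, List.foldl_map]
  unfold pvL
  rw [List.foldl_map]
  simp

lemma pv_map_getD_range (x : List Int) :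
    (List.range x.length).map (fun k => x.getD k 0) = x := by
  apply List.ext_getElem
  · simp
  · intro i h1 h2
    simp [List.getD_eq_getElem?_getD, List.getElem?_eq_getElem h2]

lemma pv_keys_foldl (L : List (Int × Int)) :
    ∀ (d : PySem.Dict Int Int), (PySem.Dict.keys d).Nodup →
    (PySem.Dict.keys (L.foldl (fun d p => d.insert p.1 p.2) d))
      = PySem.Set.update (PySem.Dict.keys d) (L.map Prod.fst) := by
  induction L with
  | nil => intro d hd; simp [PySem.Set.update_nil]
  | cons p t ih =>
      intro d hd
      simp only [List.foldl_cons, List.map_cons]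
      rw [ih _ (PySem.Dict.nodup_keys_insert _ p.1 p.2 hd), PySem.Set.update_cons]
      congr 1
      by_cases h : PySem.Dict.contains d p.1
      · rw [PySem.Dict.keys_insert_of_contains d p.2 h,
            PySem.Set.add_of_mem ((PySem.Dict.contains_iff_mem_keys d p.1).mp h)]
      · rw [PySem.Dict.keys_insert_of_not_contains d p.2 (by simpa using h),
            PySem.Set.add_of_not_mem (by rw [← PySem.Dict.contains_iff_mem_keys]; simpa using h)]

lemma pv_getD_foldl (L : List (Int × Int)) (k : Int) (d : PySem.Dict Int Int) :
    PySem.Dict.getD (L.foldl (fun d p => d.insert p.1 p.2) d) k 0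
      = (((L.filter (fun p => p.1 == k)).map Prod.snd).getLast?).getD (PySem.Dict.getD d k 0) := by
  induction L using List.reverseRecOn with
  | nil => simp
  | append_singleton l p ih =>
      rw [List.foldl_append]
      simp only [List.foldl_cons, List.foldl_nil]
      rw [PySem.Dict.getD_insert, List.filter_append, List.map_append]
      by_cases h : p.1 = k
      · simp [h]
      · simp [h, ih, Ne.symm h]

lemma pvGo_cons_mem (p : Int × Int) (t : List (Int × Int)) (s : PySem.Set Int)
    (h : p.1 ∈ s) : pvGo (p :: t) s = pvGo t s := by
  simp [pvGo, h]

lemma pvGo_cons_not_mem (p : Int × Int) (t : List (Int × Int)) (s : PySem.Set Int)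
    (h : p.1 ∉ s) : pvGo (p :: t) s = p :: pvGo t (PySem.Set.add s p.1) := by
  simp [pvGo, h]

lemma pv_fold_eq_go (M : List (Int × Int)) :
    ∀ (s : PySem.Set Int) (out : List (Int × Int)),
    (M.foldl
      (fun acc p =>
        if PySem.Set.contains acc.1 p.1 then acc
        else (PySem.Set.add acc.1 p.1, acc.2 ++ [p]))
      (s, out)).2 = out ++ pvGo M s := by
  induction M with
  | nil => intro s out; simp [pvGo]
  | cons p t ih =>
      intro s out
      simp only [List.foldl_cons]
      by_cases hm : p.1 ∈ s
      · rw [pvGo_cons_mem p t s hm, if_pos ((PySem.Set.contains_iff s p.1).mpr hm)]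
        exact ih s out
      · rw [pvGo_cons_not_mem p t s hm,
            if_neg (fun hc => hm ((PySem.Set.contains_iff s p.1).mp hc))]
        rw [ih]
        simp

lemma pv_go_not_mem (M : List (Int × Int)) :
    ∀ (s : PySem.Set Int) (q : Int × Int), q ∈ pvGo M s → q.1 ∉ s := by
  induction M with
  | nil => intro s q h; simp [pvGo] at h
  | cons p t ih =>
      intro s q h
      by_cases hm : p.1 ∈ s
      · rw [pvGo_cons_mem p t s hm] at h
        exact ih s q h
      · rw [pvGo_cons_not_mem p t s hm] at h
        rcases List.mem_cons.mp h with rfl | h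
        · exact hm
        · intro hmem
          exact ih _ q h (by simp [PySem.Set.mem_add, hmem])

lemma pv_go_mem (M : List (Int × Int)) :
    ∀ (s : PySem.Set Int) (q : Int × Int),
    q ∈ pvGo M s ↔ q.1 ∉ s ∧ (M.filter (fun p => p.1 == q.1)).head? = some q := by
  induction M with
  | nil => intro s q; simp [pvGo]
  | cons p t ih =>
      intro s q
      rw [List.filter_cons]
      by_cases hm : p.1 ∈ s
      · rw [pvGo_cons_mem p t s hm]
        by_cases hk : p.1 = q.1
        · rw [if_pos (by simpa using hk)]
          simp only [List.head?_cons]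
          constructor
          · intro h
            exact absurd (hk ▸ hm) (pv_go_not_mem t s q h)
          · rintro ⟨hns, hq⟩
            have hpq : p = q := by injection hq
            exact absurd (hpq ▸ hm) hns
        · rw [if_neg (by simpa using hk)]
          exact ih s q
      · rw [pvGo_cons_not_mem p t s hm]
        by_cases hk : p.1 = q.1
        · rw [if_pos (by simpa using hk)]
          simp only [List.head?_cons, List.mem_cons]
          constructor
          · rintro (rfl | h)
            · exact ⟨hm, rfl⟩
            · exfalso
              exact pv_go_not_mem t _ q h (by simp [PySem.Set.mem_add, hk.symm])
          · rintro ⟨hns, hq⟩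
            have hpq : p = q := by injection hq
            exact Or.inl hpq.symm
        · rw [if_neg (by simpa using hk)]
          simp only [List.mem_cons]
          rw [ih]
          constructor
          · rintro (rfl | ⟨hns, hq⟩)
            · exact absurd rfl hk
            · exact ⟨fun hmem => hns (by simp [PySem.Set.mem_add, hmem]), hq⟩
          · rintro ⟨hns, hq⟩
            right
            refine ⟨?_, hq⟩
            simp only [PySem.Set.mem_add]
            rintro (hmem | heq)
            · exact hns hmem
            · exact hk heq.symm

lemma pv_go_fst_nodup (M : List (Int × Int)) :
    ∀ (s : PySem.Set Int), ((pvGo M s).map Prod.fst).Nodup := by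
  induction M with
  | nil => intro s; simp [pvGo]
  | cons p t ih =>
      intro s
      by_cases hm : p.1 ∈ s
      · rw [pvGo_cons_mem p t s hm]; exact ih s
      · rw [pvGo_cons_not_mem p t s hm]
        simp only [List.map_cons, List.nodup_cons]
        refine ⟨?_, ih _⟩
        intro hmem
        rcases List.mem_map.mp hmem with ⟨q, hq, hfst⟩
        exact pv_go_not_mem t _ q hq (by simp [PySem.Set.mem_add, hfst])

lemma pv_filter_getLast (L : List (Int × Int)) (k : Int) (h : k ∈ L.map Prod.fst) :
    (L.filter (fun p => p.1 == k)).getLast? = some (k, pvLastVal L k) := by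
  rcases List.mem_map.mp h with ⟨p, hp, rfl⟩
  have hne : L.filter (fun q => q.1 == p.1) ≠ [] := by
    intro he
    have hm : p ∈ L.filter (fun q => q.1 == p.1) := List.mem_filter.mpr ⟨hp, by simp⟩
    rw [he] at hm
    exact List.not_mem_nil hm
  obtain ⟨q, hq⟩ := Option.isSome_iff_exists.mp (by
    rwa [List.getLast?_isSome] : (L.filter (fun q => q.1 == p.1)).getLast?.isSome)
  have hqmem : q ∈ L.filter (fun q => q.1 == p.1) := List.mem_of_getLast? hq
  have hqk : q.1 = p.1 := by simpa using (List.mem_filter.mp hqmem).2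
  rw [hq]
  unfold pvLastVal
  rw [List.getLast?_map, hq]
  simp only [Option.map_some, Option.getD_some]
  exact congrArg some (Prod.ext hqk rfl)

lemma pv_fst_pvL (x y : List Int) : (pvL x y).map Prod.fst = x := by
  unfold pvL
  rw [List.map_map]
  exact pv_map_getD_range x

theorem pv_main (x y : List Int) : get_plot_points x y = get_plot_points_alt x y := by
  unfold get_plot_points get_plot_points_alt
  dsimp only
  rw [pv_pairs_eq, pv_dict_eq]
  set L := pvL x y with hL
  set d := L.foldl (fun d p => d.insert p.1 p.2) PySem.Dict.empty with hd
  have hkeys : PySem.Dict.keys d = PySem.Set.ofList x := by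
    rw [hd, pv_keys_foldl L PySem.Dict.empty PySem.Dict.nodup_keys_empty,
        PySem.Dict.keys_empty, PySem.Set.update_nil_left, pv_fst_pvL]
  rw [hkeys]
  set K := PySem.List.sorted (PySem.Set.ofList x) (fun k => k) false with hK
  have hKlt : K.Pairwise (· < ·) := PySem.List.sorted_ofList_pairwise_lt x
  -- A's output loop is two appends: unzip it
  rw [PySem.List.foldl_prod_mk (f := fun acc k => acc ++ [k])
        (g := fun acc k => acc ++ [PySem.Dict.getD d k 0]),
      PySem.List.foldl_append_singleton_eq_self,
      PySem.List.foldl_append_singleton_eq_map]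
  simp only [List.nil_append]
  -- B's kept list before sorting
  rw [pv_fold_eq_go, List.nil_append]
  -- the sorted kept list is K paired with the last value per key
  have hsorted : PySem.List.sorted (pvGo L.reverse PySem.Set.empty) (fun p => p.1) false
      = K.map (fun k => (k, pvLastVal L k)) := by
    apply PySem.List.sorted_eq_of_perm_of_pairwise_lt
    · apply (List.perm_ext_iff_of_nodup ?_ ?_).mpr
      · intro q
        rw [pv_go_mem]
        simp only [List.filter_reverse, List.head?_reverse, List.mem_map]
        constructor
        · rintro ⟨k, hk, rfl⟩
          refine ⟨by simp [PySem.Set.empty], ?_⟩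
          apply pv_filter_getLast
          rw [pv_fst_pvL]
          exact (PySem.Set.mem_ofList x k).mp ((PySem.List.mem_sorted _ _ _ k).mp hk)
        · rintro ⟨-, hq⟩
          have hqmem : q ∈ L.filter (fun p => p.1 == q.1) := List.mem_of_getLast? hq
          have hqL : q ∈ L := (List.mem_filter.mp hqmem).1
          have hfst : q.1 ∈ L.map Prod.fst := List.mem_map.mpr ⟨q, hqL, rfl⟩
          have := pv_filter_getLast L q.1 hfst
          rw [hq] at this
          refine ⟨q.1, ?_, Option.some.inj this.symm⟩
          rw [PySem.List.mem_sorted, PySem.Set.mem_ofList]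
          rw [pv_fst_pvL] at hfst
          exact hfst
      · exact List.Nodup.map (fun a b h => congrArg Prod.fst h)
          (hKlt.imp (fun {a b} h => ne_of_lt h))
      · exact List.Nodup.of_map Prod.fst (pv_go_fst_nodup L.reverse PySem.Set.empty)
    · rw [List.pairwise_map]
      exact hKlt
  rw [hsorted, List.map_map, List.map_map]
  simp only [Prod.mk.injEq, Function.comp_def]
  refine ⟨by simp, ?_⟩
  apply List.map_congr_left
  intro k hk
  rw [hd, pv_getD_foldl, PySem.Dict.getD_empty]
  rfl

-- ===== VERDICT (by name: the statement is the Claim_ definition above) =====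
theorem get_plot_points_spec : Claim_equal_get_plot_points := by
  intro x y _ _
  exact pv_main x y
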